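-- pv_equiv track=rewrite | github.com/zirui-HIT/HAO-Hospital-All-in-One | utils/sort_examination/sort.py | compute_priorities
-- ===== SOURCE A (Python) =====
-- import itertools
--
-- TIE_ONLY_WITHIN_CATEGORY = True
--
-- PRIORITY_FLOOR = 25
--
-- def compute_priorities(exam_meta):
--     """排序键：(cat_rank ASC, score DESC, ex_id ASC)。同类内同分并列。"""
--     items = [(ex_id, m["cat_rank"], m["score"])
--              for ex_id, m in exam_meta.items()]
--     items.sort(key=lambda x: (x[1], -x[2], x[0]))
--
--     key_fn = (lambda x: (x[1], x[2])) if TIE_ONLY_WITHIN_CATEGORY else (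
--         lambda x: (x[2],))
--     groups = [list(g) for _, g in itertools.groupby(items, key=key_fn)]
--     highest = PRIORITY_FLOOR + (len(groups) - 1)
--
--     ex_priority = {}
--     for idx, grp in enumerate(groups):
--         score = highest - idx
--         for ex_id, _, _ in grp:
--             ex_priority[ex_id] = score
--     return ex_priority, items
-- ===== SOURCE B (Python) =====
-- TIE_ONLY_WITHIN_CATEGORY = True
--
-- PRIORITY_FLOOR = 25
--
-- def compute_priorities(exam_meta):
--     """No grouping, no rank enumeration: an item's priority is PRIORITY_FLOOR plus
--     the number of distinct (cat_rank, score) keys that sort strictly after its own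
--     key (cat_rank greater, or equal cat_rank with lower score)."""
--     items = sorted(((ex_id, m["cat_rank"], m["score"])
--                     for ex_id, m in exam_meta.items()),
--                    key=lambda x: (x[1], -x[2], x[0]))
--     keyset = {(cat, sc) for _, cat, sc in items}
--     ex_priority = {
--         ex_id: PRIORITY_FLOOR + sum(1 for (c, s) in keyset
--                                     if c > cat or (c == cat and s < sc))
--         for ex_id, cat, sc in items
--     }
--     return ex_priority, items
-- ===== Notes on version B (the rewrite author's own statement) =====
-- stated objective: alternative
-- what changed: Eliminates grouping and rank enumeration entirely: B computes each item's priority as a closed form, PRIORITY_FLOOR plus the number of distinct (cat_rank, score) keys in a set that sort strictly after the item's own key, instead of A's groupby-into-groups with an enumerated nested assignment loop.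
import Mathlib
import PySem

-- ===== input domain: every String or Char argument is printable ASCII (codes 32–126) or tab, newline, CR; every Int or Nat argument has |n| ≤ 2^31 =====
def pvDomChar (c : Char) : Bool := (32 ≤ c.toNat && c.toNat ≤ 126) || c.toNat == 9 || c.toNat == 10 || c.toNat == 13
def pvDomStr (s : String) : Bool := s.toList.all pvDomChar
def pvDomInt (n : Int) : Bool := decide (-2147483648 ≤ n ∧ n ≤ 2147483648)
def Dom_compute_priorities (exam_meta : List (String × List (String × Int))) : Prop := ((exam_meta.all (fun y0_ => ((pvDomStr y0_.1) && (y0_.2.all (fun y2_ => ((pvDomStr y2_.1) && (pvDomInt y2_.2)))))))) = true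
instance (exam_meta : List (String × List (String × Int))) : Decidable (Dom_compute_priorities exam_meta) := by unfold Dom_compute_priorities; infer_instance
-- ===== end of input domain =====

-- B drops A's grouping/ranking pass: each item's priority is computed directly as
-- PRIORITY_FLOOR plus the number of distinct keys in a set that sort strictly after
-- the item's own key (objective: alternative, no speed claim).

-- ===== PORT A =====
-- shared by both ports: both Pythons build the item list with the identical
-- comprehension over exam_meta.items() and sort it with key (x[1], -x[2], x[0])
def pvSortKey (x : String × Int × Int) : Lex (Int × Lex (Int × String)) :=
  toLex (x.2.1, toLex (-x.2.2, x.1))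

-- m["cat_rank"] / m["score"]: `.getD 0` is unreachable under Pre_ (a Python KeyError)
def pvItems (exam_meta : List (String × List (String × Int))) : List (String × Int × Int) :=
  (PySem.Dict.ofList exam_meta).items.map
    (fun p => (p.1, ((PySem.Dict.ofList p.2).get? "cat_rank").getD 0,
                    ((PySem.Dict.ofList p.2).get? "score").getD 0))

-- itertools.groupby(items, key) (consecutive runs of equal keys, as lists);
-- TIE_ONLY_WITHIN_CATEGORY = True, so the key is (x[1], x[2])
def pvGrpAux (kc : Int × Int) (cur : List (String × Int × Int)) :
    List (String × Int × Int) → List (List (String × Int × Int))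
  | [] => [cur.reverse]
  | x :: xs => if (x.2.1, x.2.2) = kc then pvGrpAux kc (x :: cur) xs
               else cur.reverse :: pvGrpAux (x.2.1, x.2.2) [x] xs

def pvGroupby : List (String × Int × Int) → List (List (String × Int × Int))
  | [] => []
  | x :: xs => pvGrpAux (x.2.1, x.2.2) [x] xs

def compute_priorities (exam_meta : List (String × List (String × Int))) :
    (List (String × Int)) × (List (String × Int × Int)) :=
  let items := PySem.List.sorted (pvItems exam_meta) pvSortKey
  let groups := pvGroupby items
  let highest : Int := 25 + ((groups.length : Int) - 1)
  -- for idx, grp in enumerate(groups): for ex_id, _, _ in grp: ex_priority[ex_id] = highest - idx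
  let ex_priority := (groups.foldl
      (fun st grp => (grp.foldl (fun d it => d.insert it.1 (highest - st.2)) st.1, st.2 + 1))
      ((PySem.Dict.empty : PySem.Dict String Int), (0 : Int))).1
  (ex_priority.items, items)

-- ===== PORT B =====
-- `c > cat or (c == cat and s < sc)` on a set element (c, s) against the item key (cat, sc)
def pvKgt (kit k : Int × Int) : Bool := kit.1 < k.1 || (kit.1 == k.1 && k.2 < kit.2)

def compute_priorities_alt (exam_meta : List (String × List (String × Int))) :
    (List (String × Int)) × (List (String × Int × Int)) :=
  let items := PySem.List.sorted (pvItems exam_meta) pvSortKey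
  -- keyset = {(cat, sc) for _, cat, sc in items}
  let keyset : PySem.Set (Int × Int) := PySem.Set.ofList (items.map (fun it => (it.2.1, it.2.2)))
  -- ex_priority = {ex_id: 25 + sum(1 for (c, s) in keyset if c > cat or (c == cat and s < sc)) …}
  -- (the sum only COUNTS set elements, so it is independent of the set's iteration order)
  let ex_priority := items.foldl
      (fun d it => d.insert it.1
        (25 + (List.countP (pvKgt (it.2.1, it.2.2)) keyset : Int)))
      (PySem.Dict.empty : PySem.Dict String Int)
  (ex_priority.items, items)

-- ===== PRECONDITION & SPEC =====
-- Pre_ excludes exactly the inputs where Python A raises KeyError: some inner dict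
-- (after outer-dict key collapse) lacks the key "cat_rank" or "score".
def Pre_compute_priorities (exam_meta : List (String × List (String × Int))) : Prop :=
  ∀ p ∈ (PySem.Dict.ofList exam_meta).items,
    "cat_rank" ∈ p.2.map Prod.fst ∧ "score" ∈ p.2.map Prod.fst
instance (exam_meta : List (String × List (String × Int))) : Decidable (Pre_compute_priorities exam_meta) := by unfold Pre_compute_priorities; infer_instance

def pvWitness_compute_priorities : (List (String × List (String × Int))) :=
  [("a", [("cat_rank", 1), ("score", 2)]), ("b", [("cat_rank", 1), ("score", 2)])]

def Spec_compute_priorities (exam_meta : List (String × List (String × Int))) (out : (List (String × Int)) × (List (String × Int × Int))) : Prop := out = compute_priorities_alt exam_meta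
instance (exam_meta : List (String × List (String × Int))) (out : (List (String × Int)) × (List (String × Int × Int))) : Decidable (Spec_compute_priorities exam_meta out) := by unfold Spec_compute_priorities; infer_instance

-- ===== CLAIM (what is proved, stated in full; the proofs are below) =====
def Claim_equal_compute_priorities : Prop := ∀ (exam_meta : List (String × List (String × Int))), Dom_compute_priorities exam_meta → Pre_compute_priorities exam_meta → Spec_compute_priorities exam_meta (compute_priorities exam_meta)

-- ===== LEMMAS AND PROOFS =====

-- the grouping key of an item
def pvK (x : String × Int × Int) : Int × Int := (x.2.1, x.2.2)

-- run keys of the tail of a run decomposition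
def pvRkAux (kc : Int × Int) : List (String × Int × Int) → List (Int × Int)
  | [] => []
  | x :: xs => if (x.2.1, x.2.2) = kc then pvRkAux kc xs
               else (x.2.1, x.2.2) :: pvRkAux (x.2.1, x.2.2) xs

def pvRunKeys : List (String × Int × Int) → List (Int × Int)
  | [] => []
  | x :: xs => (x.2.1, x.2.2) :: pvRkAux (x.2.1, x.2.2) xs

-- the (total) order the sort induces on group keys, and its strict version
def pvKle (a b : Int × Int) : Prop := a.1 < b.1 ∨ (a.1 = b.1 ∧ b.2 ≤ a.2)
def pvKlt (a b : Int × Int) : Prop := a.1 < b.1 ∨ (a.1 = b.1 ∧ b.2 < a.2)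

lemma pvKle_antisymm {a b : Int × Int} (h1 : pvKle a b) (h2 : pvKle b a) : a = b := by
  rcases a with ⟨a1, a2⟩; rcases b with ⟨b1, b2⟩
  rcases h1 with h1 | ⟨h1, h1'⟩ <;> rcases h2 with h2 | ⟨h2, h2'⟩ <;>
    simp_all <;> omega

lemma pvKgt_iff (a b : Int × Int) : pvKgt a b = true ↔ pvKlt a b := by
  rcases a with ⟨a1, a2⟩; rcases b with ⟨b1, b2⟩
  simp [pvKgt, pvKlt]

lemma pvKlt_of_kle_ne {a b : Int × Int} (h : pvKle a b) (hne : a ≠ b) : pvKlt a b := by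
  rcases a with ⟨a1, a2⟩; rcases b with ⟨b1, b2⟩
  rcases h with h | ⟨h, h'⟩
  · exact Or.inl h
  · right
    refine ⟨h, ?_⟩
    rcases lt_or_eq_of_le h' with h'' | h''
    · exact h''
    · exact absurd (by rw [Prod.mk.injEq]; exact ⟨h, h''.symm⟩) hne

lemma pvKlt_irrefl (a : Int × Int) : ¬ pvKlt a a := by
  rcases a with ⟨a1, a2⟩; simp [pvKlt]

lemma pvKlt_asymm {a b : Int × Int} (h : pvKlt a b) : ¬ pvKlt b a := by
  rcases a with ⟨a1, a2⟩; rcases b with ⟨b1, b2⟩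
  rcases h with h | ⟨h, h'⟩ <;> simp [pvKlt] <;> omega

lemma pvGrpAux_flatten (l : List (String × Int × Int)) :
    ∀ kc cur, (pvGrpAux kc cur l).flatten = cur.reverse ++ l := by
  induction l with
  | nil => intro kc cur; simp [pvGrpAux]
  | cons x xs ih =>
      intro kc cur
      by_cases h : (x.2.1, x.2.2) = kc
      · simp [pvGrpAux, h, ih]
      · simp [pvGrpAux, h, ih]

lemma pvGrpAux_forall₂ (l : List (String × Int × Int)) :
    ∀ kc cur, (∀ it ∈ cur, (it.2.1, it.2.2) = kc) →
    List.Forall₂ (fun g key => ∀ it ∈ g, pvK it = key)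
      (pvGrpAux kc cur l) (kc :: pvRkAux kc l) := by
  induction l with
  | nil =>
      intro kc cur hcur
      simp only [pvGrpAux, pvRkAux]
      exact List.Forall₂.cons (by simpa [pvK] using hcur) List.Forall₂.nil
  | cons x xs ih =>
      intro kc cur hcur
      by_cases h : (x.2.1, x.2.2) = kc
      · simp only [pvGrpAux, pvRkAux, if_pos h]
        exact ih kc (x :: cur) (by
          intro it hit
          rcases List.mem_cons.mp hit with rfl | hit
          · exact h
          · exact hcur it hit)
      · simp only [pvGrpAux, pvRkAux, if_neg h]
        exact List.Forall₂.cons (by simpa [pvK] using hcur)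
          (ih (x.2.1, x.2.2) [x] (by intro it hit; simp at hit; simp [hit]))

lemma pvRkAux_chain (l : List (String × Int × Int)) :
    ∀ kc, List.IsChain (· ≠ ·) (kc :: pvRkAux kc l) := by
  induction l with
  | nil => intro kc; simp [pvRkAux]
  | cons x xs ih =>
      intro kc
      by_cases h : (x.2.1, x.2.2) = kc
      · simpa [pvRkAux, h] using ih kc
      · simp only [pvRkAux, if_neg h]
        exact List.IsChain.cons_cons (fun he => h he.symm) (ih (x.2.1, x.2.2))

lemma pvRkAux_sublist (l : List (String × Int × Int)) :
    ∀ kc, (pvRkAux kc l).Sublist (l.map pvK) := by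
  induction l with
  | nil => intro kc; simp [pvRkAux]
  | cons x xs ih =>
      intro kc
      by_cases h : (x.2.1, x.2.2) = kc
      · simp only [pvRkAux, if_pos h, List.map_cons]
        exact (ih kc).cons _
      · simp only [pvRkAux, if_neg h, List.map_cons]
        exact (ih (x.2.1, x.2.2)).cons₂ _

lemma pvRkAux_covers (l : List (String × Int × Int)) :
    ∀ kc it, it ∈ l → pvK it = kc ∨ pvK it ∈ pvRkAux kc l := by
  induction l with
  | nil => intro kc it hit; simp at hit
  | cons x xs ih =>
      intro kc it hit
      by_cases h : (x.2.1, x.2.2) = kc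
      · simp only [pvRkAux, if_pos h]
        rcases List.mem_cons.mp hit with rfl | hit
        · exact Or.inl h
        · exact ih kc it hit
      · simp only [pvRkAux, if_neg h]
        rcases List.mem_cons.mp hit with rfl | hit
        · right; exact List.mem_cons_self
        · rcases ih (x.2.1, x.2.2) it hit with he | hm
          · right; rw [he]; exact List.mem_cons_self
          · right; exact List.mem_cons_of_mem _ hm

lemma pvPairwise_ne_of_kle_chain (ks : List (Int × Int))
    (hp : ks.Pairwise pvKle) (hc : List.IsChain (· ≠ ·) ks) :
    ks.Pairwise (· ≠ ·) := by
  induction ks with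
  | nil => exact List.Pairwise.nil
  | cons a t ih =>
      rcases List.pairwise_cons.mp hp with ⟨ha, hpt⟩
      refine List.pairwise_cons.mpr ⟨?_, ?_⟩
      · intro b hb rfl
        match t, hb with
        | h :: t', hb =>
          have hne : a ≠ h := (List.isChain_cons_cons.mp hc).1
          rcases List.mem_cons.mp hb with rfl | hb'
          · exact hne rfl
          · have h1 : pvKle a h := ha h (List.mem_cons_self)
            have h2 : pvKle h a := (List.pairwise_cons.mp hpt).1 a hb'
            exact hne (pvKle_antisymm h1 h2)
      · exact ih hpt (hc.tail)

-- count of elements strictly after position j in a strictly increasing list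
lemma pvCountAfter (ks : List (Int × Int)) (hp : ks.Pairwise pvKlt) :
    ∀ j, (hj : j < ks.length) → ks.countP (pvKgt ks[j]) = ks.length - 1 - j := by
  induction ks with
  | nil => intro j hj; simp at hj
  | cons a t ih =>
      rcases List.pairwise_cons.mp hp with ⟨ha, ht⟩
      intro j hj
      match j with
      | 0 =>
          simp only [List.getElem_cons_zero, List.countP_cons]
          rw [List.countP_eq_length.mpr (by
            intro k hk
            exact (pvKgt_iff a k).mpr (ha k hk))]
          have : ¬ pvKlt a a := pvKlt_irrefl a
          simp [pvKgt_iff, this]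
      | Nat.succ j' =>
          have hj' : j' < t.length := by simpa using hj
          simp only [List.getElem_cons_succ, List.countP_cons]
          rw [ih ht j' hj']
          have hlt : pvKlt a t[j'] := ha t[j'] (List.getElem_mem hj')
          have : ¬ pvKlt t[j'] a := pvKlt_asymm hlt
          simp [pvKgt_iff, this]
          omega

lemma pvFold_groups (highest : Int) (w : String × Int × Int → Int)
    (gs : List (List (String × Int × Int))) :
    ∀ (d : PySem.Dict String Int) (i : Int),
    (∀ (j : Nat) g, gs[j]? = some g → ∀ it ∈ g, w it = highest - (i + j)) →
    (gs.foldl (fun st grp => (grp.foldl (fun d it => d.insert it.1 (highest - st.2)) st.1, st.2 + 1)) (d, i)).1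
      = gs.flatten.foldl (fun d it => d.insert it.1 (w it)) d := by
  induction gs with
  | nil => intro d i h; rfl
  | cons g gs ih =>
      intro d i h
      simp only [List.foldl_cons, List.flatten_cons, List.foldl_append]
      rw [ih (g.foldl (fun d it => d.insert it.1 (highest - i)) d) (i + 1) ?_]
      · congr 1
        refine PySem.List.foldl_congr_mem g _ _ d ?_
        intro acc x hx
        rw [(h 0 g rfl x hx : w x = highest - (i + (0:Nat)))]
        norm_num
      · intro j g' hj it hit
        rw [h (j + 1) g' (by simpa using hj) it hit]
        congr 1
        push_cast
        ring

-- proof-side names for the two ex_priority dicts (definitionally the ports' let-chains)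
def pvADict (s : List (String × Int × Int)) : PySem.Dict String Int :=
  ((pvGroupby s).foldl
      (fun st grp => (grp.foldl
        (fun d it => d.insert it.1 ((25 + (((pvGroupby s).length : Int) - 1)) - st.2)) st.1, st.2 + 1))
      ((PySem.Dict.empty : PySem.Dict String Int), (0 : Int))).1

def pvBDict (s : List (String × Int × Int)) : PySem.Dict String Int :=
  s.foldl
      (fun d it => d.insert it.1
        (25 + (List.countP (pvKgt (it.2.1, it.2.2))
                 (PySem.Set.ofList (s.map (fun it => (it.2.1, it.2.2)))) : Int)))
      (PySem.Dict.empty : PySem.Dict String Int)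

lemma pvKle_of_key_le {a b : String × Int × Int} (h : pvSortKey a ≤ pvSortKey b) :
    pvKle (pvK a) (pvK b) := by
  unfold pvSortKey at h
  rw [Prod.Lex.le_iff] at h
  unfold pvKle pvK
  rcases h with h | ⟨h1, h2⟩
  · exact Or.inl h
  · rw [Prod.Lex.le_iff] at h2
    rcases h2 with h2 | ⟨h2, _⟩
    · simp only [ofLex_toLex] at h1 h2 ⊢
      right; omega
    · simp only [ofLex_toLex] at h1 h2 ⊢
      right; omega

lemma pvABDict (s : List (String × Int × Int))
    (hp : s.Pairwise fun a b => pvKle (pvK a) (pvK b)) :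
    pvADict s = pvBDict s := by
  match s with
  | [] => rfl
  | x :: xs =>
    have hflat : (pvGroupby (x :: xs)).flatten = x :: xs := by
      simpa [pvGroupby] using pvGrpAux_flatten xs (x.2.1, x.2.2) [x]
    have hforall : List.Forall₂ (fun g key => ∀ it ∈ g, pvK it = key)
        (pvGroupby (x :: xs)) (pvRunKeys (x :: xs)) := by
      simpa [pvGroupby, pvRunKeys] using
        pvGrpAux_forall₂ xs (x.2.1, x.2.2) [x]
          (by intro it hit; simp at hit; simp [hit])
    have hsub : (pvRunKeys (x :: xs)).Sublist ((x :: xs).map pvK) := by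
      simp only [pvRunKeys, List.map_cons]
      exact (pvRkAux_sublist xs (x.2.1, x.2.2)).cons₂ _
    have hpairle : (pvRunKeys (x :: xs)).Pairwise pvKle :=
      List.Pairwise.sublist hsub (List.pairwise_map.mpr hp)
    have hchain : List.IsChain (· ≠ ·) (pvRunKeys (x :: xs)) := by
      simpa [pvRunKeys] using pvRkAux_chain xs (x.2.1, x.2.2)
    have hnodup : (pvRunKeys (x :: xs)).Pairwise (· ≠ ·) :=
      pvPairwise_ne_of_kle_chain _ hpairle hchain
    have hpairlt : (pvRunKeys (x :: xs)).Pairwise pvKlt :=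
      (hpairle.and hnodup).imp (fun h => pvKlt_of_kle_ne h.1 h.2)
    have hlen : (pvGroupby (x :: xs)).length = (pvRunKeys (x :: xs)).length :=
      hforall.length_eq
    -- the set of keys is a permutation of the run keys
    have hperm : (PySem.Set.ofList ((x :: xs).map (fun it => (it.2.1, it.2.2)))).Perm
        (pvRunKeys (x :: xs)) := by
      refine (List.perm_ext_iff_of_nodup (PySem.Set.nodup_ofList _)
        (List.nodup_iff_pairwise_ne.mpr hnodup) |>.mpr ?_)
      intro k
      rw [PySem.Set.mem_ofList]
      constructor
      · intro hk
        rcases List.mem_map.mp hk with ⟨it, hit, rfl⟩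
        rcases List.mem_cons.mp hit with rfl | hit'
        · exact List.mem_cons_self
        · rcases pvRkAux_covers xs (x.2.1, x.2.2) it hit' with he | hm
          · simp only [pvRunKeys]
            rw [show ((it.2.1, it.2.2) : Int × Int) = pvK it from rfl, he]
            exact List.mem_cons_self
          · exact List.mem_cons_of_mem _ (by simpa [pvK] using hm)
      · intro hk
        have : k ∈ (x :: xs).map pvK := hsub.mem hk
        simpa [pvK] using this
    have hval : ∀ (j : Nat) g, (pvGroupby (x :: xs))[j]? = some g → ∀ it ∈ g,
        (25 + (List.countP (pvKgt (it.2.1, it.2.2))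
                 (PySem.Set.ofList ((x :: xs).map (fun it => (it.2.1, it.2.2)))) : Int))
          = (25 + (((pvGroupby (x :: xs)).length : Int) - 1)) - ((0 : Int) + (j : Nat)) := by
      intro j g hj it hit
      rcases List.getElem?_eq_some_iff.mp hj with ⟨hjlt, hg⟩
      have hjlt' : j < (pvRunKeys (x :: xs)).length := hlen ▸ hjlt
      have hrel := (List.forall₂_iff_get.mp hforall).2 j hjlt hjlt'
      have hkit : ((it.2.1, it.2.2) : Int × Int) = (pvRunKeys (x :: xs))[j] := by
        have := hrel it (by rw [List.get_eq_getElem, hg]; exact hit)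
        simpa [pvK, List.get_eq_getElem] using this
      rw [hkit, hperm.countP_eq, pvCountAfter _ hpairlt j hjlt']
      have hl := hlen
      have hjG : j < (pvGroupby (x :: xs)).length := hjlt
      omega
    unfold pvADict pvBDict
    rw [pvFold_groups _
          (fun it => 25 + (List.countP (pvKgt (it.2.1, it.2.2))
                 (PySem.Set.ofList ((x :: xs).map (fun it => (it.2.1, it.2.2)))) : Int))
          (pvGroupby (x :: xs)) PySem.Dict.empty 0 hval, hflat]

-- ===== VERDICT (by name: the statement is the Claim_ definition above) =====
theorem compute_priorities_spec : Claim_equal_compute_priorities := by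
  intro em _ _
  unfold Spec_compute_priorities compute_priorities compute_priorities_alt
  show ((pvADict (PySem.List.sorted (pvItems em) pvSortKey)).items,
        PySem.List.sorted (pvItems em) pvSortKey)
     = ((pvBDict (PySem.List.sorted (pvItems em) pvSortKey)).items,
        PySem.List.sorted (pvItems em) pvSortKey)
  rw [pvABDict _ ((PySem.List.sorted_pairwise (pvItems em) pvSortKey).imp pvKle_of_key_le)]
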